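-- pv_equiv track=rewrite | github.com/pcast31/schur | ramsey/src/template.py | mr_tree
-- ===== SOURCE A (Python) =====
-- def mr_tree(width, head, subset):
--     if len(subset) <= 1:
--         yield subset
--         return
--     x = subset[0]
--     y = subset[1]
--     for mod_subset in mr_tree(width, head, subset[1:]):
--         yield [x] + mod_subset
--         if y > head and y - x <= head:
--             yield [x] + [z + width for z in mod_subset]
-- ===== SOURCE B (Python) =====
-- def mr_tree(width, head, subset):
--     # Bitmask enumeration instead of recursion: eligible positions i (using the
--     # original values) may each independently shift the suffix after them by width.
--     E = [i for i in range(len(subset) - 1)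
--          if subset[i + 1] > head and subset[i + 1] - subset[i] <= head]
--     for k in range(2 ** len(E)):
--         chosen = [E[t] for t in range(len(E)) if (k >> t) & 1]
--         yield [subset[j] + width * sum(1 for i in chosen if i < j)
--                for j in range(len(subset))]
-- ===== Notes on version B (the rewrite author's own statement) =====
-- stated objective: alternative
-- what changed: Replaces the recursive generator with a flat bitmask enumeration: eligible shift positions are precomputed once from the original subset, then each of the 2^|E| output lists is built directly from its bitmask (bit 0 = earliest eligible position), with no recursion and no repeated list prepending.
import Mathlib
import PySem

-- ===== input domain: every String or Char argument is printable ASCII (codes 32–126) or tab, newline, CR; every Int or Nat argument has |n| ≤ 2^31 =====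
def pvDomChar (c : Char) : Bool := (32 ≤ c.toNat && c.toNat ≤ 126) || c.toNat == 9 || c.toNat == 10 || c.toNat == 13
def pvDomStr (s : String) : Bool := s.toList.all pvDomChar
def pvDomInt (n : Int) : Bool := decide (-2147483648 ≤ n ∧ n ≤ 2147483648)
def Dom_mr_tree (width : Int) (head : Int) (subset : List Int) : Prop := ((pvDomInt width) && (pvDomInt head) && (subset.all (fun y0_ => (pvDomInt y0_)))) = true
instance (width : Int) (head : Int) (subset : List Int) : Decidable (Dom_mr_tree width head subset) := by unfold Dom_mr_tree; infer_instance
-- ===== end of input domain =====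

-- B replaces A's recursive generator with a flat bitmask enumeration of the
-- eligible shift positions (alternative decomposition, same exact output order).

-- ===== PORT A =====
-- literal transliteration of A's recursive generator (its yields collected in order;
-- 'yield a; if c: yield b' becomes [a] ++ (if c then [b] else []))
def mr_tree (width : Int) (head : Int) (subset : List Int) : List (List Int) :=
  match subset with
  | x :: y :: rest =>
      (mr_tree width head (y :: rest)).flatMap (fun mod_subset =>
        [x :: mod_subset] ++
          (if y > head ∧ y - x ≤ head then [x :: mod_subset.map (fun z => z + width)] else []))
  | _ => [subset]

-- ===== PORT B =====
-- eligB / chosenB / rowB are the three list comprehensions of Source B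
def eligB (head : Int) (subset : List Int) : List Nat :=
  (List.range (subset.length - 1)).filter
    (fun i => decide (subset.getD (i + 1) 0 > head ∧ subset.getD (i + 1) 0 - subset.getD i 0 ≤ head))

def chosenB (k : Nat) (E : List Nat) : List Nat :=
  ((List.range E.length).filter (fun t => (k >>> t) &&& 1 == 1)).map (fun t => E.getD t 0)

def rowB (width : Int) (subset : List Int) (chosen : List Nat) : List Int :=
  (List.range subset.length).map
    (fun j => subset.getD j 0 + width * ((chosen.filter (fun i => i < j)).length : Int))

def mr_tree_alt (width : Int) (head : Int) (subset : List Int) : List (List Int) :=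
  let E := eligB head subset
  (List.range (2 ^ E.length)).map (fun k => rowB width subset (chosenB k E))

-- ===== PRECONDITION & SPEC =====
def Spec_mr_tree (width : Int) (head : Int) (subset : List Int) (out : List (List Int)) : Prop := out = mr_tree_alt width head subset
instance (width : Int) (head : Int) (subset : List Int) (out : List (List Int)) : Decidable (Spec_mr_tree width head subset out) := by unfold Spec_mr_tree; infer_instance

-- ===== CLAIM (what is proved, stated in full; the proofs are below) =====
def Claim_equal_mr_tree : Prop := ∀ (width : Int) (head : Int) (subset : List Int), Dom_mr_tree width head subset → Spec_mr_tree width head subset (mr_tree width head subset)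

-- ===== LEMMAS AND PROOFS =====

-- recursive characterisation of Source B's `chosen` comprehension (bit t of k picks E[t])
def choiceR : Nat → List Nat → List Nat
  | _, [] => []
  | k, p :: ps => (if k % 2 = 1 then [p] else []) ++ choiceR (k / 2) ps

theorem chosenB_eq_choiceR (k : Nat) (E : List Nat) : chosenB k E = choiceR k E := by
  induction E generalizing k with
  | nil => rfl
  | cons p ps ih =>
      unfold chosenB choiceR
      rw [List.length_cons, List.range_succ_eq_map]
      simp only [List.filter_cons, List.filter_map]
      have h0 : ((k >>> 0) &&& 1 == 1) = (k % 2 == 1) := by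
        simp [Nat.shiftRight_zero, Nat.and_one_is_mod]
      have hs : ∀ t : Nat, k >>> (t + 1) = (k / 2) >>> t := by
        intro t
        rw [Nat.shiftRight_eq_div_pow, Nat.shiftRight_eq_div_pow, pow_succ,
          Nat.mul_comm, ← Nat.div_div_eq_div_mul]
      have hrest : List.map (fun t => (p :: ps).getD t 0)
          (List.map Nat.succ (List.filter ((fun t => (k >>> t) &&& 1 == 1) ∘ Nat.succ) (List.range ps.length)))
          = choiceR (k / 2) ps := by
        rw [← ih (k / 2)]
        unfold chosenB
        rw [List.map_map]
        congr 1
        apply List.filter_congr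
        intro t _
        simp [Function.comp, hs t]
      rw [h0]
      by_cases h : k % 2 = 1
      · simp only [h, beq_self_eq_true, if_pos, List.map_cons, List.getD_cons_zero]
        rw [hrest]; rfl
      · have hb : (k % 2 == 1) = false := by simpa using h
        simp only [hb, Bool.false_eq_true, if_neg, not_false_iff]
        rw [hrest]
        simp [h]

theorem choiceR_map_succ (k : Nat) (E : List Nat) :
    choiceR k (E.map (· + 1)) = (choiceR k E).map (· + 1) := by
  induction E generalizing k with
  | nil => rfl
  | cons p ps ih =>
      unfold choiceR
      simp only [List.map_cons, List.map_append, ih]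
      split_ifs <;> simp

-- eligibility positions of x :: y :: rest are position 0 (iff the A-side condition
-- holds) followed by the shifted eligibility positions of y :: rest
theorem elig_cons (head x y : Int) (rest : List Int) :
    eligB head (x :: y :: rest) =
      (if y > head ∧ y - x ≤ head then [0] else []) ++ (eligB head (y :: rest)).map (· + 1) := by
  unfold eligB
  simp only [List.length_cons, Nat.add_sub_cancel]
  rw [List.range_succ_eq_map, List.filter_cons, List.filter_map]
  have hrest : List.map Nat.succ
      (List.filter ((fun i => decide ((x :: y :: rest).getD (i + 1) 0 > head ∧
          (x :: y :: rest).getD (i + 1) 0 - (x :: y :: rest).getD i 0 ≤ head)) ∘ Nat.succ)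
        (List.range rest.length))
      = List.map (fun i => i + 1)
        (List.filter (fun i => decide ((y :: rest).getD (i + 1) 0 > head ∧
          (y :: rest).getD (i + 1) 0 - (y :: rest).getD i 0 ≤ head)) (List.range rest.length)) := by
    have : ∀ i : Nat, ((fun i => decide ((x :: y :: rest).getD (i + 1) 0 > head ∧
          (x :: y :: rest).getD (i + 1) 0 - (x :: y :: rest).getD i 0 ≤ head)) ∘ Nat.succ) i
        = (fun i => decide ((y :: rest).getD (i + 1) 0 > head ∧
          (y :: rest).getD (i + 1) 0 - (y :: rest).getD i 0 ≤ head)) i := by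
      intro i; simp [Function.comp]
    rw [List.filter_congr (fun i _ => this i)]
  rw [hrest]
  simp only [List.getD_cons_zero, List.getD_cons_succ]
  by_cases h : y > head ∧ y - x ≤ head
  · rw [decide_eq_true h, if_pos rfl, if_pos h]
    rfl
  · rw [decide_eq_false h, if_neg h]
    simp

-- prepending an unshifted / shifted head to a row
theorem row_cons (width x : Int) (tail : List Int) (cs : List Nat) :
    rowB width (x :: tail) (cs.map (· + 1)) = x :: rowB width tail cs := by
  unfold rowB
  rw [List.length_cons, List.range_succ_eq_map, List.map_cons, List.map_map]
  congr 1
  · simp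
  · apply List.map_congr_left
    intro j _
    simp only [Function.comp_apply, List.getD_cons_succ]
    have hf : (cs.map (· + 1)).filter (fun i => i < j.succ) = (cs.filter (fun i => i < j)).map (· + 1) := by
      rw [List.filter_map]
      congr 1
      apply List.filter_congr
      intro i _
      simp [Function.comp]
    rw [hf, List.length_map]

theorem row_cons_mod (width x : Int) (tail : List Int) (cs : List Nat) :
    rowB width (x :: tail) (0 :: cs.map (· + 1)) =
      x :: (rowB width tail cs).map (fun z => z + width) := by
  unfold rowB
  rw [List.length_cons, List.range_succ_eq_map, List.map_cons, List.map_map, List.map_map]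
  congr 1
  · simp
  · apply List.map_congr_left
    intro j _
    simp only [Function.comp_apply, List.getD_cons_succ]
    have hf : ((0 : Nat) :: cs.map (· + 1)).filter (fun i => i < j.succ) =
        0 :: (cs.filter (fun i => i < j)).map (· + 1) := by
      rw [List.filter_cons]
      simp only [Nat.zero_lt_succ, decide_true, if_pos]
      rw [List.filter_map]
      congr 2
      apply List.filter_congr
      intro i _
      simp [Function.comp]
    rw [hf]
    simp only [List.length_cons, List.length_map]
    push_cast
    ring

-- enumerating 2*n bitmasks = enumerating n bitmasks, two variants each
theorem pvRangeTwoMul (n : Nat) (f : Nat → List Int) :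
    (List.range (2 * n)).map f =
      (List.range n).flatMap (fun q => [f (2 * q), f (2 * q + 1)]) := by
  induction n with
  | zero => rfl
  | succ m ih =>
      have h2 : 2 * (m + 1) = 2 * m + 1 + 1 := by ring
      rw [h2, List.range_succ, List.range_succ, List.range_succ]
      simp [List.map_append, List.flatMap_append, ih]

theorem flatMap_single (l : List (List Int)) (f : List Int → List Int) :
    l.flatMap (fun m => [f m]) = l.map f := by
  induction l with
  | nil => rfl
  | cons a t ih => simp [List.flatMap_cons, ih]

theorem mr_tree_cons_eq (width head x y : Int) (rest : List Int) :
    mr_tree width head (x :: y :: rest) =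
      (mr_tree width head (y :: rest)).flatMap (fun m =>
        [x :: m] ++ (if y > head ∧ y - x ≤ head then [x :: m.map (fun z => z + width)] else [])) := by
  rfl

theorem mr_tree_eq_alt (width head : Int) (subset : List Int) :
    mr_tree width head subset = mr_tree_alt width head subset := by
  induction subset with
  | nil => rfl
  | cons x tail ih =>
      cases tail with
      | nil => simp [mr_tree, mr_tree_alt, eligB, rowB, chosenB]
      | cons y rest =>
          rw [mr_tree_cons_eq, ih]
          show _ = (List.range (2 ^ (eligB head (x :: y :: rest)).length)).map
            (fun k => rowB width (x :: y :: rest) (chosenB k (eligB head (x :: y :: rest))))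
          rw [elig_cons]
          set Et := eligB head (y :: rest) with hEt
          by_cases h : y > head ∧ y - x ≤ head
          · rw [if_pos h]
            have hlen : (((0 : Nat) :: Et.map (· + 1)).length) = Et.length + 1 := by simp
            show (mr_tree_alt width head (y :: rest)).flatMap _ = _
            rw [show ([0] ++ Et.map (· + 1)) = (0 :: Et.map (· + 1)) from rfl, hlen,
              pow_succ, Nat.mul_comm, pvRangeTwoMul]
            show ((List.range (2 ^ Et.length)).map
              (fun k => rowB width (y :: rest) (chosenB k Et))).flatMap _ = _
            rw [List.flatMap_map]
            apply List.flatMap_congr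
            intro q hq
            have c0 : chosenB (2 * q) (0 :: Et.map (· + 1)) = (chosenB q Et).map (· + 1) := by
              rw [chosenB_eq_choiceR, chosenB_eq_choiceR]
              show (if (2 * q) % 2 = 1 then [(0 : Nat)] else []) ++ choiceR ((2 * q) / 2) (Et.map (· + 1)) = _
              rw [show (2 * q) % 2 = 0 from by omega, show (2 * q) / 2 = q from by omega,
                choiceR_map_succ]
              simp
            have c1 : chosenB (2 * q + 1) (0 :: Et.map (· + 1)) = 0 :: (chosenB q Et).map (· + 1) := by
              rw [chosenB_eq_choiceR, chosenB_eq_choiceR]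
              show (if (2 * q + 1) % 2 = 1 then [(0 : Nat)] else []) ++ choiceR ((2 * q + 1) / 2) (Et.map (· + 1)) = _
              rw [show (2 * q + 1) % 2 = 1 from by omega, show (2 * q + 1) / 2 = q from by omega,
                choiceR_map_succ]
              simp
            simp only [c0, c1, if_pos h]
            rw [row_cons, row_cons_mod]
            rfl
          · rw [if_neg h, List.nil_append]
            simp only [if_neg h, List.append_nil]
            rw [flatMap_single]
            show ((List.range (2 ^ Et.length)).map
              (fun k => rowB width (y :: rest) (chosenB k Et))).map _ = _
            rw [List.map_map, List.length_map]
            apply List.map_congr_left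
            intro k hk
            have c : chosenB k (Et.map (· + 1)) = (chosenB k Et).map (· + 1) := by
              rw [chosenB_eq_choiceR, chosenB_eq_choiceR, choiceR_map_succ]
            simp only [Function.comp_apply, c]
            rw [row_cons]

-- ===== VERDICT (by name: the statement is the Claim_ definition above) =====
theorem mr_tree_spec : Claim_equal_mr_tree := by
  intro width head subset _
  unfold Spec_mr_tree
  exact mr_tree_eq_alt width head subset
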